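-- pv_equiv track=rewrite | github.com/Waldflamme/Study | Семенар 28.04/Stack2.py | filter_st
-- ===== SOURCE A (Python) =====
-- def simple(n):
--     if n <= 1:
--         return False
--     if n == 2:
--         return True
--     if n % 2 == 0:
--         return False
--     for i in range(3, int(n**0.5)+1, 2):
--         if n % i == 0:
--             return False
--     return True
--
-- def filter_st(st):
--     temp_st = []
--
--     while st:
--         val = st.pop()
--         if simple(val):
--             temp_st.append(val)
--
--     result_st = []
--     while temp_st:
--         result_st.append(temp_st.pop())
--
--     return result_st
-- ===== SOURCE B (Python) =====
-- def simple(n):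
--     if n <= 1:
--         return False
--     if n == 2:
--         return True
--     if n % 2 == 0:
--         return False
--     for i in range(3, int(n**0.5)+1, 2):
--         if n % i == 0:
--             return False
--     return True
--
-- def filter_st(st):
--     # Single forward pass: primes in original order; then empty st as A does.
--     result = [v for v in st if simple(v)]
--     st.clear()
--     return result
-- ===== Notes on version B (the rewrite author's own statement) =====
-- stated objective: simpler
-- what changed: Replaces A's two destructive while/pop loops and auxiliary reversal stack with one forward filtering pass over the list (plus st.clear() to reproduce A's emptying of the input).
import Mathlib
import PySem

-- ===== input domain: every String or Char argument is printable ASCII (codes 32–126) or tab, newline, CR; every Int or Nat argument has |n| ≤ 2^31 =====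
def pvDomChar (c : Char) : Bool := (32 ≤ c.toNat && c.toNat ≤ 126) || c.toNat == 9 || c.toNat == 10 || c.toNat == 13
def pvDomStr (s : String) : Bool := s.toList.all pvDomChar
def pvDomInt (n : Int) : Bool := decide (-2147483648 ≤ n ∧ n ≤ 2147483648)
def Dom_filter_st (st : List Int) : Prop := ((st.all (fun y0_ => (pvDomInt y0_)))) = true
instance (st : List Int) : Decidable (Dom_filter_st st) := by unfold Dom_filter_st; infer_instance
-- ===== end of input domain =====

-- B replaces A's two destructive pop-loops with one forward filter pass (return value only:
-- both Pythons also empty the argument list in place, which this equivalence does not model).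

-- ===== PORT A =====
-- helper simple(n); int(n**0.5) is ported as the integer square root, which is exact for the
-- arguments reached here (2 < n ≤ 2^31: float sqrt never crosses an integer boundary there)
def pySimple (n : Int) : Bool :=
  if n ≤ 1 then false
  else if n = 2 then true
  else if PySem.Int.mod n 2 = 0 then false
  else (PySem.List.pyRange 3 ((n.toNat.sqrt : Int) + 1) 2).all (fun i => !(PySem.Int.mod n i == 0))

-- while st: val = st.pop(); if simple(val): temp_st.append(val)
def filter_st_loop1 (st temp_st : List Int) : List Int :=
  match h : PySem.List.pop? st (-1) with
  | none => temp_st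
  | some (val, st') =>
      filter_st_loop1 st' (if pySimple val then temp_st ++ [val] else temp_st)
termination_by st.length
decreasing_by
  have := PySem.List.length_of_pop?_eq_some _ h
  simp at this
  omega

-- while temp_st: result_st.append(temp_st.pop())
def filter_st_loop2 (temp_st result_st : List Int) : List Int :=
  match h : PySem.List.pop? temp_st (-1) with
  | none => result_st
  | some (val, temp') => filter_st_loop2 temp' (result_st ++ [val])
termination_by temp_st.length
decreasing_by
  have := PySem.List.length_of_pop?_eq_some _ h
  simp at this
  omega

def filter_st (st : List Int) : List Int :=
  filter_st_loop2 (filter_st_loop1 st []) []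

-- ===== PORT B =====
-- B's simple, kept unchanged from A's helper
def pySimpleB (n : Int) : Bool :=
  if n ≤ 1 then false
  else if n = 2 then true
  else if PySem.Int.mod n 2 = 0 then false
  else (PySem.List.pyRange 3 ((n.toNat.sqrt : Int) + 1) 2).all (fun i => !(PySem.Int.mod n i == 0))

def filter_st_alt (st : List Int) : List Int :=
  st.filter pySimpleB

-- ===== PRECONDITION & SPEC =====
def Spec_filter_st (st : List Int) (out : List Int) : Prop := out = filter_st_alt st
instance (st : List Int) (out : List Int) : Decidable (Spec_filter_st st out) := by unfold Spec_filter_st; infer_instance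

-- ===== CLAIM (what is proved, stated in full; the proofs are below) =====
def Claim_equal_filter_st : Prop := ∀ (st : List Int), Dom_filter_st st → Spec_filter_st st (filter_st st)

-- ===== LEMMAS AND PROOFS =====
theorem loop1_eq (st : List Int) :
    ∀ temp, filter_st_loop1 st temp = temp ++ (st.reverse.filter pySimple) := by
  induction st using List.reverseRecOn with
  | nil =>
      intro temp; rw [filter_st_loop1]
      split
      · simp
      · next h => simp [PySem.List.pop?] at h
  | append_singleton xs x ih =>
      intro temp
      rw [filter_st_loop1]
      split
      · next h => rw [PySem.List.pop?_last] at h; cases h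
      · next val st' h =>
          rw [PySem.List.pop?_last] at h
          simp only [Option.some.injEq, Prod.mk.injEq] at h
          obtain ⟨rfl, rfl⟩ := h
          rw [ih]
          by_cases hp : pySimple x <;> simp [hp]

theorem loop2_eq (st : List Int) :
    ∀ res, filter_st_loop2 st res = res ++ st.reverse := by
  induction st using List.reverseRecOn with
  | nil =>
      intro res; rw [filter_st_loop2]
      split
      · simp
      · next h => simp [PySem.List.pop?] at h
  | append_singleton xs x ih =>
      intro res
      rw [filter_st_loop2]
      split
      · next h => rw [PySem.List.pop?_last] at h; cases h
      · next val temp' h =>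
          rw [PySem.List.pop?_last] at h
          simp only [Option.some.injEq, Prod.mk.injEq] at h
          obtain ⟨rfl, rfl⟩ := h
          rw [ih]
          simp

-- ===== VERDICT (by name: the statement is the Claim_ definition above) =====
theorem filter_st_spec : Claim_equal_filter_st := by
  intro st _
  show filter_st st = filter_st_alt st
  rw [filter_st, loop1_eq, loop2_eq]
  have hps : pySimple = pySimpleB := rfl
  simp [filter_st_alt, hps, List.filter_reverse]
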